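-- pv_equiv track=rewrite | github.com/meimei517514/xmldiff | basecode/xmlaccess.py | restore_xml
-- ===== SOURCE A (Python) =====
-- def restore_xml(file_line):
--
--     #将因为标签数据过长而换行的行数据恢复
--
--     xml_file=[]
--
--     ignore_line=[]
--
--     for key,line in enumerate(file_line):
--
--         if key not in ignore_line:
--
--             xml_file.append(line)
--
--             slide_count=line.count("<")
--
--             anslide_count=line.count(">")
--
--             if "<Cell" in line and slide_count!=anslide_count:
--
--                 for index,cell in enumerate(file_line[key+1:]):
--
--                     if "<" in cell and "<Cell" not in cell:
--
--                         append_line=cell.strip("-+ ")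
--
--                         last=len(xml_file)-1
--
--                         xml_file[last]=xml_file[last].strip("\r\n")+" "+append_line
--
--                         ignore_line.append(key+index+1)
--
--                     else:
--                         break
--
--     return xml_file
-- ===== SOURCE B (Python) =====
-- def restore_xml(file_line):
--     # single linear pass with a 'merging' flag instead of an ignore-index list + inner lookahead
--     xml_file = []
--     merging = False
--     for line in file_line:
--         if merging and "<" in line and "<Cell" not in line:
--             last = len(xml_file) - 1
--             xml_file[last] = xml_file[last].strip("\r\n") + " " + line.strip("-+ ")
--         else:
--             xml_file.append(line)
--             merging = "<Cell" in line and line.count("<") != line.count(">")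
--     return xml_file
-- ===== Notes on version B (the rewrite author's own statement) =====
-- stated objective: faster
-- what changed: Replaced the ignore-index list (with linear membership tests) plus the inner lookahead loop over file_line[key+1:] by a single linear pass carrying a boolean 'merging' flag that folds continuation lines into the last emitted line.
import Mathlib
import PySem

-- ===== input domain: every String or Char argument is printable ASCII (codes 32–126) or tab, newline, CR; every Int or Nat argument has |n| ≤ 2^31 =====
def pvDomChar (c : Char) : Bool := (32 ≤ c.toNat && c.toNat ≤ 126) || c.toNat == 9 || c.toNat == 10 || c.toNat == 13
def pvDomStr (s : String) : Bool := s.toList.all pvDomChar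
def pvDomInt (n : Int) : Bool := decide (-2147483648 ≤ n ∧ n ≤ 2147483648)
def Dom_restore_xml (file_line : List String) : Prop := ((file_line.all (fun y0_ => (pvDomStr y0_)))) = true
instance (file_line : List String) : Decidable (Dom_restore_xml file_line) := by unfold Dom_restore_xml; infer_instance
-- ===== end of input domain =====

-- B replaces A's ignore-index list and inner lookahead loop by one linear pass with a boolean 'merging' flag (objective: simpler).

-- ===== PORT A =====
-- inner loop 'for index,cell in enumerate(file_line[key+1:]): …' (with break);
-- pos is the absolute index key+index+1 of the current cell
def restoreInner : List String → Nat → List String → List Nat → (List String × List Nat)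
  | [], _, xml, ign => (xml, ign)
  | cell :: rest, pos, xml, ign =>
    if PySem.Str.isIn "<" cell && !PySem.Str.isIn "<Cell" cell then
      restoreInner rest (pos + 1)
        (xml.set (xml.length - 1)
          (PySem.Str.stripChars (xml.getD (xml.length - 1) "") "\r\n" ++ " " ++ PySem.Str.stripChars cell "-+ "))
        (ign ++ [pos])
    else (xml, ign)

-- outer loop 'for key,line in enumerate(file_line)'
def restoreOuter (orig : List String) : List String → Nat → List String → List Nat → List String
  | [], _, xml, _ => xml
  | line :: rest, key, xml, ign =>
    if key ∈ ign then restoreOuter orig rest (key + 1) xml ign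
    else
      if PySem.Str.isIn "<Cell" line && !(PySem.Str.count line "<" == PySem.Str.count line ">") then
        restoreOuter orig rest (key + 1)
          (restoreInner (PySem.List.slice orig (some ((key : Int) + 1)) none) (key + 1) (xml ++ [line]) ign).1
          (restoreInner (PySem.List.slice orig (some ((key : Int) + 1)) none) (key + 1) (xml ++ [line]) ign).2
      else restoreOuter orig rest (key + 1) (xml ++ [line]) ign

def restore_xml (file_line : List String) : List String :=
  restoreOuter file_line file_line 0 [] []

-- ===== PORT B =====
def restoreAlt : List String → List String → Bool → List String
  | [], xml, _ => xml
  | line :: rest, xml, merging =>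
    if merging && PySem.Str.isIn "<" line && !PySem.Str.isIn "<Cell" line then
      restoreAlt rest
        (xml.set (xml.length - 1)
          (PySem.Str.stripChars (xml.getD (xml.length - 1) "") "\r\n" ++ " " ++ PySem.Str.stripChars line "-+ "))
        merging
    else
      restoreAlt rest (xml ++ [line])
        (PySem.Str.isIn "<Cell" line && !(PySem.Str.count line "<" == PySem.Str.count line ">"))

def restore_xml_alt (file_line : List String) : List String :=
  restoreAlt file_line [] false

-- ===== PRECONDITION & SPEC =====
def Spec_restore_xml (file_line : List String) (out : List String) : Prop := out = restore_xml_alt file_line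
instance (file_line : List String) (out : List String) : Decidable (Spec_restore_xml file_line out) := by unfold Spec_restore_xml; infer_instance

-- ===== CLAIM (what is proved, stated in full; the proofs are below) =====
def Claim_equal_restore_xml : Prop := ∀ (file_line : List String), Dom_restore_xml file_line → Spec_restore_xml file_line (restore_xml file_line)

-- ===== LEMMAS AND PROOFS =====

-- A's inner loop only appends to ignore_line
lemma restoreInner_snd_prefix : ∀ (rest : List String) (pos : Nat) (xml : List String) (ign : List Nat),
    ∃ extra, (restoreInner rest pos xml ign).2 = ign ++ extra := by
  intro rest
  induction rest with
  | nil => intro pos xml ign; exact ⟨[], by simp [restoreInner]⟩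
  | cons cell rest ih =>
    intro pos xml ign
    by_cases hc : (PySem.Str.isIn "<" cell && !PySem.Str.isIn "<Cell" cell) = true
    · obtain ⟨e, he⟩ := ih (pos + 1)
        (xml.set (xml.length - 1)
          (PySem.Str.stripChars (xml.getD (xml.length - 1) "") "\r\n" ++ " " ++ PySem.Str.stripChars cell "-+ "))
        (ign ++ [pos])
      refine ⟨pos :: e, ?_⟩
      simp only [restoreInner]
      rw [if_pos hc, he]
      simp
    · refine ⟨[], ?_⟩
      simp only [restoreInner]
      rw [if_neg hc]
      simp
-- combined left-hand side: A's state at absolute index `key`, either in normal mode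
-- (m = false) or in the middle of the continuation-merging inner loop (m = true)
def ABlhs (orig rest : List String) (key : Nat) (xml : List String) (ign : List Nat) : Bool → List String
  | true =>
    restoreOuter orig rest key (restoreInner rest key xml ign).1 (restoreInner rest key xml ign).2
  | false => restoreOuter orig rest key xml ign

lemma key_lemma (orig : List String) : ∀ (rest : List String) (key : Nat) (xml : List String) (ign : List Nat) (m : Bool),
    rest = orig.drop key → (∀ i ∈ ign, i < key) →
    ABlhs orig rest key xml ign m = restoreAlt rest xml m := by
  intro rest
  induction rest with
  | nil =>
    intro key xml ign m _ _
    cases m <;> simp [ABlhs, restoreOuter, restoreInner, restoreAlt]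
  | cons line rest ih =>
    intro key xml ign m hdrop hign
    have hrest : rest = orig.drop (key + 1) := by
      have h1 : orig.drop (key + 1) = (orig.drop key).drop 1 := by
        rw [List.drop_drop]
      rw [h1, ← hdrop]; rfl
    have hnm : key ∉ ign := fun h => absurd (hign _ h) (lt_irrefl key)
    have hslice : PySem.List.slice orig (some ((key : Int) + 1)) none = rest := by
      have h1 : ((key : Int) + 1) = ((key + 1 : Nat) : Int) := by push_cast; ring
      rw [h1, PySem.List.slice_from_natCast, ← hrest]
    -- A in normal mode at line::rest equals B's else-branch continuation
    have hfalse : restoreOuter orig (line :: rest) key xml ign =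
        restoreAlt rest (xml ++ [line])
          (PySem.Str.isIn "<Cell" line && !(PySem.Str.count line "<" == PySem.Str.count line ">")) := by
      by_cases ht : (PySem.Str.isIn "<Cell" line && !(PySem.Str.count line "<" == PySem.Str.count line ">")) = true
      · have hih := ih (key + 1) (xml ++ [line]) ign true hrest
          (fun i hi => Nat.lt_succ_of_lt (hign i hi))
        simp only [ABlhs] at hih
        simp only [restoreOuter]
        rw [if_neg hnm, if_pos ht, hslice, hih, ht]
      · have hih := ih (key + 1) (xml ++ [line]) ign false hrest
          (fun i hi => Nat.lt_succ_of_lt (hign i hi))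
        simp only [ABlhs] at hih
        simp only [restoreOuter]
        rw [if_neg hnm, if_neg ht, hih, Bool.eq_false_iff.mpr ht]
    cases m with
    | false => simpa only [ABlhs] using hfalse
    | true =>
      by_cases hc : (PySem.Str.isIn "<" line && !PySem.Str.isIn "<Cell" line) = true
      · -- continuation line: A's inner loop merges it; B merges it
        have hinner : restoreInner (line :: rest) key xml ign =
            restoreInner rest (key + 1)
              (xml.set (xml.length - 1)
                (PySem.Str.stripChars (xml.getD (xml.length - 1) "") "\r\n" ++ " " ++ PySem.Str.stripChars line "-+ "))
              (ign ++ [key]) := by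
          simp only [restoreInner]
          rw [if_pos hc]
        obtain ⟨extra, hex⟩ := restoreInner_snd_prefix rest (key + 1)
          (xml.set (xml.length - 1)
            (PySem.Str.stripChars (xml.getD (xml.length - 1) "") "\r\n" ++ " " ++ PySem.Str.stripChars line "-+ "))
          (ign ++ [key])
        have hmem : key ∈ (restoreInner rest (key + 1)
            (xml.set (xml.length - 1)
              (PySem.Str.stripChars (xml.getD (xml.length - 1) "") "\r\n" ++ " " ++ PySem.Str.stripChars line "-+ "))
            (ign ++ [key])).2 := by
          rw [hex]; simp
        have hih := ih (key + 1)
          (xml.set (xml.length - 1)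
            (PySem.Str.stripChars (xml.getD (xml.length - 1) "") "\r\n" ++ " " ++ PySem.Str.stripChars line "-+ "))
          (ign ++ [key]) true hrest
          (by intro i hi
              rcases List.mem_append.mp hi with h | h
              · exact Nat.lt_succ_of_lt (hign i h)
              · simp at h; omega)
        simp only [ABlhs] at hih ⊢
        rw [hinner]
        conv_lhs => rw [restoreOuter]
        rw [if_pos hmem, hih]
        conv_rhs => rw [restoreAlt]
        rw [if_pos (by rw [Bool.true_and]; exact hc)]
      · -- breaking line: A's inner loop returns immediately; both fall back to normal mode
        have hinner : restoreInner (line :: rest) key xml ign = (xml, ign) := by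
          simp only [restoreInner]
          rw [if_neg hc]
        simp only [ABlhs]
        rw [hinner, hfalse]
        conv_rhs => rw [restoreAlt]
        rw [if_neg (by rw [Bool.true_and]; exact hc)]

-- ===== VERDICT (by name: the statement is the Claim_ definition above) =====
theorem restore_xml_spec : Claim_equal_restore_xml := by
  intro file_line _
  unfold Spec_restore_xml restore_xml restore_xml_alt
  have h := key_lemma file_line file_line 0 [] [] false rfl (by simp)
  simpa only [ABlhs] using h
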